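-- pv_equiv track=rewrite | github.com/olaugh/cgpbot | testgen/scripts/match_game.py | board_occupancy
-- ===== SOURCE A (Python) =====
-- def board_occupancy(cgp: str) -> frozenset:
--     """Return set of (row, col) positions that have tiles, from a CGP string."""
--     board_str = cgp.split()[0]
--     rows = board_str.split("/")
--     occupied = set()
--     for r, row in enumerate(rows):
--         c = 0
--         for ch in row:
--             if ch.isdigit():
--                 c += int(ch)
--             else:
--                 occupied.add((r, c))
--                 c += 1
--     return frozenset(occupied)
-- ===== SOURCE B (Python) =====
-- def board_occupancy(cgp: str) -> frozenset:
--     """Return set of (row, col) positions that have tiles, from a CGP string."""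
--     rows = cgp.split()[0].split("/")
--     occupied = set()
--     for r, row in enumerate(rows):
--         # per-character starting columns via a prefix-sum table
--         starts = [0]
--         for ch in row:
--             starts.append(starts[-1] + (int(ch) if ch.isdigit() else 1))
--         occupied.update((r, c) for ch, c in zip(row, starts) if not ch.isdigit())
--     return frozenset(occupied)
-- ===== Notes on version B (the rewrite author's own statement) =====
-- stated objective: alternative
-- what changed: Replaces A's mutable running-column counter interleaved with set.add by a two-phase per-row pass: first build a prefix-sum table of starting columns, then add (r, start) for every non-digit character via zip+filter.
import Mathlib
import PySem

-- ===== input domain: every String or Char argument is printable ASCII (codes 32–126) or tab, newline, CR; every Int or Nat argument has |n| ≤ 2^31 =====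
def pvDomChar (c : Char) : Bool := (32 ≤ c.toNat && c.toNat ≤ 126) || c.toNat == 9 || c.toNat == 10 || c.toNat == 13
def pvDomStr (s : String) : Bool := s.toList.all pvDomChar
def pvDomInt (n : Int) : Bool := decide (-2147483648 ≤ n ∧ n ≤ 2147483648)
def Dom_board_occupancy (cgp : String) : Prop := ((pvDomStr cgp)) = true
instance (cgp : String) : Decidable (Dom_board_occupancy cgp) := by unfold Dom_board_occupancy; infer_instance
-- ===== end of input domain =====

-- B restructures A's interleaved counter/set loop into a per-row prefix-sum table plus a zip+filter pass;
-- same cost, different decomposition (objective: alternative). frozenset(occupied) on a set is modelled as the set itself.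

-- ===== PORT A =====
-- per-character step of A's inner loop: running (set, column) state
def pvStepA (r : Int) (st : PySem.Set (Int × Int) × Int) (ch : Char) : PySem.Set (Int × Int) × Int :=
  if PySem.Chars.isdigit ch then
    (st.1, st.2 + (PySem.Int.ofChars? [ch]).getD 0)  -- int(ch); a digit char always parses, getD is never taken
  else
    (PySem.Set.add st.1 (r, st.2), st.2 + 1)

def board_occupancy (cgp : String) : List (Int × Int) :=
  match PySem.Str.split₀ cgp with
  | [] => []   -- Python: IndexError on cgp.split()[0]; excluded by Pre_
  | boardStr :: _ =>
    let rows := PySem.Chars.splitOn boardStr.toList "/".toList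
    (PySem.List.enumerate rows 0).foldl
      (fun occ rp => (rp.2.foldl (pvStepA rp.1) (occ, (0 : Int))).1)
      PySem.Set.empty

-- ===== PORT B =====
-- starts table: starts = [0]; for ch in row: starts.append(starts[-1] + (int(ch) if ch.isdigit() else 1))
def pvStarts (row : List Char) : List Int :=
  row.foldl
    (fun st ch =>
      st ++ [(PySem.List.pyGet? st (-1)).getD 0 +
             (if PySem.Chars.isdigit ch then (PySem.Int.ofChars? [ch]).getD 0 else 1)])
    [(0 : Int)]

def board_occupancy_alt (cgp : String) : List (Int × Int) :=
  match PySem.Str.split₀ cgp with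
  | [] => []   -- Python: IndexError on cgp.split()[0]; excluded by Pre_
  | boardStr :: _ =>
    let rows := PySem.Chars.splitOn boardStr.toList "/".toList
    (PySem.List.enumerate rows 0).foldl
      (fun occ rp =>
        PySem.Set.update occ
          (((rp.2.zip (pvStarts rp.2)).filter
              (fun p => ! PySem.Chars.isdigit p.1)).map (fun p => (rp.1, p.2))))
      PySem.Set.empty

-- ===== PRECONDITION & SPEC =====
-- Pre_ excludes exactly the inputs (whitespace-only strings) on which cgp.split()[0] raises IndexError in both A and B
def Pre_board_occupancy (cgp : String) : Prop := PySem.Str.split₀ cgp ≠ []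
instance (cgp : String) : Decidable (Pre_board_occupancy cgp) := by unfold Pre_board_occupancy; infer_instance
def pvWitness_board_occupancy : String := "AB2C/3/1D1 lex"

def Spec_board_occupancy (cgp : String) (out : List (Int × Int)) : Prop := out = board_occupancy_alt cgp
instance (cgp : String) (out : List (Int × Int)) : Decidable (Spec_board_occupancy cgp out) := by unfold Spec_board_occupancy; infer_instance

-- ===== CLAIM (what is proved, stated in full; the proofs are below) =====
def Claim_equal_board_occupancy : Prop := ∀ (cgp : String), Dom_board_occupancy cgp → Pre_board_occupancy cgp → Spec_board_occupancy cgp (board_occupancy cgp)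

-- ===== LEMMAS AND PROOFS =====

-- the per-row advance
def pvAdv (ch : Char) : Int :=
  if PySem.Chars.isdigit ch then (PySem.Int.ofChars? [ch]).getD 0 else 1

-- column scan starting at c (proof-side recursive view of the starts table)
def pvScan (c : Int) : List Char → List Int
  | [] => [c]
  | ch :: t => c :: pvScan (c + pvAdv ch) t

lemma pvStarts_eq_scan_aux (row : List Char) (pre : List Int) (c : Int) :
    row.foldl
      (fun st ch =>
        st ++ [(PySem.List.pyGet? st (-1)).getD 0 +
               (if PySem.Chars.isdigit ch then (PySem.Int.ofChars? [ch]).getD 0 else 1)])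
      (pre ++ [c]) = pre ++ pvScan c row := by
  induction row generalizing pre c with
  | nil => simp [pvScan]
  | cons ch t ih =>
    have hlast : (PySem.List.pyGet? (pre ++ [c]) (-1)).getD 0 = c := by
      simp [PySem.List.pyGet?, PySem.List.pyIdx?]
    simp only [List.foldl_cons, hlast, pvScan]
    have := ih (pre ++ [c]) (c + pvAdv ch)
    simpa [pvAdv, List.append_assoc] using this

lemma pvStarts_eq_scan (row : List Char) : pvStarts row = pvScan 0 row := by
  simpa using pvStarts_eq_scan_aux row [] 0

-- A's inner loop emits exactly B's filtered zip list, added in order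
lemma pvInner (r : Int) (row : List Char) (occ : PySem.Set (Int × Int)) (c : Int) :
    (row.foldl (pvStepA r) (occ, c)).1 =
      PySem.Set.update occ
        (((row.zip (pvScan c row)).filter
            (fun p => ! PySem.Chars.isdigit p.1)).map (fun p => (r, p.2))) := by
  induction row generalizing occ c with
  | nil => simp [PySem.Set.update, pvScan]
  | cons ch t ih =>
    by_cases h : PySem.Chars.isdigit ch = true
    · simp [pvScan, pvStepA, h, pvAdv, ih]
    · simp only [pvScan, List.zip_cons_cons, List.filter_cons, List.foldl_cons, pvStepA, h]
      simp [h, ih, pvAdv, PySem.Set.update]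

theorem board_occupancy_spec : Claim_equal_board_occupancy := by
  intro cgp _ hpre
  unfold Spec_board_occupancy board_occupancy board_occupancy_alt
  cases hsplit : PySem.Str.split₀ cgp with
  | nil => exact absurd hsplit hpre
  | cons b rest =>
    simp only
    congr 1
    funext occ rp
    rw [pvStarts_eq_scan, pvInner]
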